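-- pv_equiv track=rewrite | github.com/secnot/uva-onlinejudge-solutions | 850 - Crypt Kicker II/main.py | has_same_spaces
-- ===== SOURCE A (Python) =====
-- def has_same_spaces(plain, cipher):
--     """has same number of spaces in same positions"""
--     if len(plain) != len(cipher):
--         return False
--
--     if plain.count(' ') != cipher.count(' '):
--         return False
--
--     for p, c in zip(plain, cipher):
--         if p==' ' and c != p:
--             return False
--
--     return True
-- ===== SOURCE B (Python) =====
-- def has_same_spaces(plain, cipher):
--     """has same number of spaces in same positions"""
--     if len(plain) != len(cipher):
--         return False
--     return [i for i, ch in enumerate(plain) if ch == ' '] == \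
--            [i for i, ch in enumerate(cipher) if ch == ' ']
-- ===== Notes on version B (the rewrite author's own statement) =====
-- stated objective: alternative
-- what changed: Replaces the count comparison plus positional zip scan with building each string's list of space indices (enumerate+filter) once and comparing the two index lists for equality.
import Mathlib
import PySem

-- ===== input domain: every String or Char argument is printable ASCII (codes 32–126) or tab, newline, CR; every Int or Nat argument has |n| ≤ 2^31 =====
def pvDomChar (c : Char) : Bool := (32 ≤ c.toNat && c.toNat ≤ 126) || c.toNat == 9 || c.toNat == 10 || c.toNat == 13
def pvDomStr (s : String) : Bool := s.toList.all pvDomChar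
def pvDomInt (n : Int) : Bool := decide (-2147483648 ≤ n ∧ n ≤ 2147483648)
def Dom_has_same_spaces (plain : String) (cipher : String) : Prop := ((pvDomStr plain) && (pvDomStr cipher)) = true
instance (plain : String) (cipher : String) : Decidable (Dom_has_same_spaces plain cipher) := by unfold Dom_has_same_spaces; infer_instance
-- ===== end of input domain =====

-- B builds each string's list of space indices (enumerate+filter) once and compares the two
-- lists, replacing A's count comparison plus positional zip scan (alternative decomposition).


-- ===== PORT A =====
-- literal transliteration: length guard, space-count guard, then the zip loop with early return
def has_same_spaces (plain : String) (cipher : String) : Bool :=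
  if PySem.Str.len plain ≠ PySem.Str.len cipher then false
  else if PySem.Str.count plain " " ≠ PySem.Str.count cipher " " then false
  else (plain.toList.zip cipher.toList).all (fun pc => !(pc.1 == ' ' && pc.2 != pc.1))

-- ===== PORT B =====
-- [i for i, ch in enumerate(s) if ch == ' ']
def pvSpaceIdxs (s : String) : List Int :=
  ((PySem.List.enumerate s.toList 0).filter (fun p => p.2 == ' ')).map (·.1)

def has_same_spaces_alt (plain : String) (cipher : String) : Bool :=
  if PySem.Str.len plain ≠ PySem.Str.len cipher then false
  else pvSpaceIdxs plain == pvSpaceIdxs cipher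

-- ===== PRECONDITION & SPEC =====
def Spec_has_same_spaces (plain : String) (cipher : String) (out : Bool) : Prop := out = has_same_spaces_alt plain cipher
instance (plain : String) (cipher : String) (out : Bool) : Decidable (Spec_has_same_spaces plain cipher out) := by unfold Spec_has_same_spaces; infer_instance

-- ===== CLAIM (what is proved, stated in full; the proofs are below) =====
def Claim_equal_has_same_spaces : Prop := ∀ (plain : String) (cipher : String), Dom_has_same_spaces plain cipher → Spec_has_same_spaces plain cipher (has_same_spaces plain cipher)

-- ===== LEMMAS AND PROOFS =====

-- structural version of the space-index list, with explicit start offset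
def spIdx : List Char → Int → List Int
  | [], _ => []
  | x :: xs, s => if x = ' ' then s :: spIdx xs (s + 1) else spIdx xs (s + 1)

theorem spIdx_eq_filter (l : List Char) (s : Int) :
    ((PySem.List.enumerate l s).filter (fun p => p.2 == ' ')).map (·.1) = spIdx l s := by
  induction l generalizing s with
  | nil => simp [spIdx, PySem.List.enumerate_nil]
  | cons x xs ih =>
    simp only [PySem.List.enumerate_cons, List.filter_cons, spIdx]
    by_cases hx : x = ' ' <;> simp [hx, ih]

theorem spIdx_mem_ge (l : List Char) (s i : Int) (h : i ∈ spIdx l s) : s ≤ i := by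
  induction l generalizing s with
  | nil => simp [spIdx] at h
  | cons x xs ih =>
    simp only [spIdx] at h
    split at h
    · rcases List.mem_cons.mp h with h | h
      · omega
      · have := ih (s + 1) h; omega
    · have := ih (s + 1) h; omega

-- forward zip check implies count ≤ count
theorem count_le_of_zip (l c : List Char) (hlen : l.length = c.length)
    (h : (l.zip c).all (fun pc => !(pc.1 == ' ' && pc.2 != pc.1)) = true) :
    l.count ' ' ≤ c.count ' ' := by
  induction l generalizing c with
  | nil => simp
  | cons x xs ih =>
    cases c with
    | nil => simp at hlen
    | cons y ys =>
      simp only [List.zip_cons_cons, List.all_cons, Bool.and_eq_true] at h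
      have hx := h.1
      have ht := ih ys (by simpa using hlen) h.2
      by_cases hxs : x = ' '
      · have hy : y = ' ' := by
          subst hxs
          by_contra hy
          simp [hy] at hx
        simp [hxs, hy]; omega
      · by_cases hys : y = ' ' <;> simp [hxs, hys] <;> omega

-- the core equivalence at any start offset
theorem core (l c : List Char) (hlen : l.length = c.length) (s : Int) :
    ((l.count ' ' = c.count ' ') ∧
      (l.zip c).all (fun pc => !(pc.1 == ' ' && pc.2 != pc.1)) = true) ↔
    spIdx l s = spIdx c s := by
  induction l generalizing c s with
  | nil =>
    cases c with
    | nil => simp [spIdx]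
    | cons y ys => simp at hlen
  | cons x xs ih =>
    cases c with
    | nil => simp at hlen
    | cons y ys =>
      have hlen' : xs.length = ys.length := by simpa using hlen
      simp only [List.zip_cons_cons, List.all_cons, Bool.and_eq_true]
      by_cases hx : x = ' ' <;> by_cases hy : y = ' '
      · -- both spaces
        subst hx; subst hy
        have e1 : spIdx (' ' :: xs) s = s :: spIdx xs (s + 1) := by simp [spIdx]
        have e2 : spIdx (' ' :: ys) s = s :: spIdx ys (s + 1) := by simp [spIdx]
        rw [e1, e2]
        constructor
        · rintro ⟨hc, _, ht⟩
          have hc' : xs.count ' ' = ys.count ' ' := by simp at hc; omega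
          rw [(ih ys hlen' (s + 1)).mp ⟨hc', ht⟩]
        · intro h
          have h' : spIdx xs (s + 1) = spIdx ys (s + 1) := by injection h
          have := (ih ys hlen' (s + 1)).mpr h'
          exact ⟨by simp [this.1], by simp, this.2⟩
      · -- x space, y not: A-side head check fails; B-side lists differ
        constructor
        · rintro ⟨_, hhd, _⟩
          subst hx
          simp at hhd
          exact absurd hhd hy
        · intro h
          exfalso
          simp only [spIdx, if_pos hx, if_neg hy] at h
          have hm : s ∈ spIdx ys (s + 1) := h ▸ List.mem_cons_self ..
          have := spIdx_mem_ge ys (s + 1) s hm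
          omega
      · -- x not space, y space: counts can't match given forward inclusion on tails
        constructor
        · rintro ⟨hc, _, ht⟩
          exfalso
          have hle := count_le_of_zip xs ys hlen' ht
          simp [hx, hy] at hc
          omega
        · intro h
          exfalso
          simp only [spIdx, if_neg hx, if_pos hy] at h
          have hm : s ∈ spIdx xs (s + 1) := h ▸ List.mem_cons_self ..
          have := spIdx_mem_ge xs (s + 1) s hm
          omega
      · -- neither space
        simp only [spIdx, if_neg hx, if_neg hy]
        constructor
        · rintro ⟨hc, _, ht⟩
          exact (ih ys hlen' (s + 1)).mp ⟨by simpa [List.count_cons, hx, hy] using hc, ht⟩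
        · intro h
          have := (ih ys hlen' (s + 1)).mpr h
          exact ⟨by simpa [List.count_cons, hx, hy] using this.1, by simp [hx], this.2⟩

-- s.count(' ') with a single-char needle is the character count of ' '
theorem count_go_space (fuel : Nat) (l : List Char) (acc : Nat) (h : l.length ≤ fuel) :
    PySem.Chars.count.go [' '] fuel l acc = acc + l.countP (fun x => x == ' ') := by
  induction fuel generalizing l acc with
  | zero =>
    have : l = [] := by cases l <;> simp_all
    subst this; simp [PySem.Chars.count.go]
  | succ n ih =>
    cases l with
    | nil => simp [PySem.Chars.count.go]
    | cons x t =>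
      by_cases hx : x = ' '
      · subst hx
        rw [show PySem.Chars.count.go [' '] (n + 1) (' ' :: t) acc
              = PySem.Chars.count.go [' '] n t (acc + 1) from by
          simp [PySem.Chars.count.go, List.isPrefixOf]]
        rw [ih t (acc + 1) (by simpa using h)]
        simp; omega
      · rw [show PySem.Chars.count.go [' '] (n + 1) (x :: t) acc
              = PySem.Chars.count.go [' '] n t acc from by
          simp only [PySem.Chars.count.go, List.isPrefixOf]
          simp
          intro h; exact absurd h.symm hx]
        rw [ih t acc (by simpa using h)]
        simp [hx]

theorem str_count_space (s : String) : PySem.Str.count s " " = s.toList.count ' ' := by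
  rw [PySem.Str.count_eq]
  show PySem.Chars.count s.toList [' '] = _
  rw [List.count]
  simp only [PySem.Chars.count]
  rw [if_neg (by simp), count_go_space _ _ _ le_rfl]
  simp

-- ===== VERDICT (by name: the statement is the Claim_ definition above) =====
theorem has_same_spaces_spec : Claim_equal_has_same_spaces := by
  intro plain cipher _
  unfold Spec_has_same_spaces has_same_spaces has_same_spaces_alt
  by_cases hlen : PySem.Str.len plain ≠ PySem.Str.len cipher
  · rw [if_pos hlen, if_pos hlen]
  · rw [if_neg hlen, if_neg hlen]
    have hleq := not_not.mp hlen
    have hlen' : plain.toList.length = cipher.toList.length := by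
      have e1 : plain.length = plain.toList.length := by simp
      have e2 : cipher.length = cipher.toList.length := by simp
      simp [PySem.Str.len] at hleq
      omega
    have hc := core plain.toList cipher.toList hlen' 0
    unfold pvSpaceIdxs
    rw [spIdx_eq_filter, spIdx_eq_filter]
    by_cases hcount : PySem.Str.count plain " " ≠ PySem.Str.count cipher " "
    · rw [if_pos hcount]
      rw [str_count_space, str_count_space] at hcount
      symm
      rw [beq_eq_false_iff_ne]
      intro h
      exact hcount ((hc.mpr h).1)
    · rw [if_neg hcount]
      have hcount' := not_not.mp hcount
      rw [str_count_space, str_count_space] at hcount'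
      by_cases hall : (plain.toList.zip cipher.toList).all (fun pc => !(pc.1 == ' ' && pc.2 != pc.1)) = true
      · rw [hall, hc.mp ⟨hcount', hall⟩]
        simp
      · have hall' : (plain.toList.zip cipher.toList).all (fun pc => !(pc.1 == ' ' && pc.2 != pc.1)) = false := by
          simpa using hall
        rw [hall']
        symm
        rw [beq_eq_false_iff_ne]
        intro h
        have := (hc.mpr h).2
        rw [hall'] at this
        exact Bool.false_ne_true this
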